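-- pv_equiv track=rewrite | github.com/olumayy/ai_x_security | labs/lab14-c2-traffic-analysis/solution/main.py | _match_c2_profile
-- ===== SOURCE A (Python) =====
-- from typing import Dict, List, Optional, Tuple
--
-- def _match_c2_profile(flows: List[dict]) -> Optional[str]:
--     """Match session against known C2 profiles."""
--     uris = [f.get("uri", "") for f in flows]
--
--     # Cobalt Strike defaults
--     cs_patterns = ["/submit.php", "/__utm.gif", "/pixel.gif"]
--     if any(any(p in uri for p in cs_patterns) for uri in uris):
--         return "Cobalt Strike (default profile)"
--
--     # Metasploit patterns
--     if any("/met" in uri.lower() for uri in uris):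
--         return "Possible Metasploit"
--
--     return None
-- ===== SOURCE B (Python) =====
-- from typing import Dict, List, Optional, Tuple
--
-- _CS_PATTERNS = ["/submit.php", "/__utm.gif", "/pixel.gif"]
--
-- def _match_c2_profile(flows: List[dict]) -> Optional[str]:
--     """Match session against known C2 profiles (single pass over flows)."""
--     met_found = False
--     for f in flows:
--         uri = f.get("uri", "")
--         if any(p in uri for p in _CS_PATTERNS):
--             return "Cobalt Strike (default profile)"
--         if "/met" in uri.lower():
--             met_found = True
--     return "Possible Metasploit" if met_found else None
-- ===== Notes on version B (the rewrite author's own statement) =====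
-- stated objective: simpler
-- what changed: Replaces the intermediate uris list and two separate any() scans with one pass over flows that returns Cobalt Strike immediately and carries a met_found flag, preserving cs-over-met precedence.
import Mathlib
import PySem

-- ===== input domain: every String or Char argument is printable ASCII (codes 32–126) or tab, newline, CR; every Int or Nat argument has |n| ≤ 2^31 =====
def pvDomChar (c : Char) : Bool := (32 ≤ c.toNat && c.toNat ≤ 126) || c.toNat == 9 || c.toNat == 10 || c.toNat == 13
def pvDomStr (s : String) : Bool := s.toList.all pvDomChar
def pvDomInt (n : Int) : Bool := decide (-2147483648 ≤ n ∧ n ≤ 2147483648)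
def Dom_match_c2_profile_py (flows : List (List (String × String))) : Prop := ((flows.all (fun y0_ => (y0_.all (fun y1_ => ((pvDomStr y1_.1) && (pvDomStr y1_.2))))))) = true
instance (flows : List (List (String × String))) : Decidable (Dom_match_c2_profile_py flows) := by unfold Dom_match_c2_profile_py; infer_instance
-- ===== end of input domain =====

-- B replaces the uris list and the two separate any() scans by a single pass carrying a met flag (objective: simpler).


-- ===== PORT A =====
def match_c2_profile_py (flows : List (List (String × String))) : Option String :=
  let uris := flows.map (fun f => (PySem.Dict.mk f).getD "uri" "")
  let cs_patterns := ["/submit.php", "/__utm.gif", "/pixel.gif"]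
  if uris.any (fun uri => cs_patterns.any (fun p => PySem.Str.isIn p uri)) then
    some "Cobalt Strike (default profile)"
  else if uris.any (fun uri => PySem.Str.isIn "/met" (PySem.Str.lower uri)) then
    some "Possible Metasploit"
  else
    none

-- ===== PORT B =====
def matchC2Loop : List (List (String × String)) → Bool → Option String
  | [], met => if met then some "Possible Metasploit" else none
  | f :: rest, met =>
    let uri := (PySem.Dict.mk f).getD "uri" ""
    if ["/submit.php", "/__utm.gif", "/pixel.gif"].any (fun p => PySem.Str.isIn p uri) then
      some "Cobalt Strike (default profile)"
    else
      matchC2Loop rest (met || PySem.Str.isIn "/met" (PySem.Str.lower uri))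

def match_c2_profile_py_alt (flows : List (List (String × String))) : Option String :=
  matchC2Loop flows false

-- ===== PRECONDITION & SPEC =====
def Spec_match_c2_profile_py (flows : List (List (String × String))) (out : Option String) : Prop := out = match_c2_profile_py_alt flows
instance (flows : List (List (String × String))) (out : Option String) : Decidable (Spec_match_c2_profile_py flows out) := by unfold Spec_match_c2_profile_py; infer_instance

-- ===== CLAIM (what is proved, stated in full; the proofs are below) =====
def Claim_equal_match_c2_profile_py : Prop := ∀ (flows : List (List (String × String))), Dom_match_c2_profile_py flows → Spec_match_c2_profile_py flows (match_c2_profile_py flows)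

-- ===== LEMMAS AND PROOFS =====
def csHit (f : List (String × String)) : Bool :=
  ["/submit.php", "/__utm.gif", "/pixel.gif"].any
    (fun p => PySem.Str.isIn p ((PySem.Dict.mk f).getD "uri" ""))

def metHit (f : List (String × String)) : Bool :=
  PySem.Str.isIn "/met" (PySem.Str.lower ((PySem.Dict.mk f).getD "uri" ""))

lemma matchC2Loop_eq (l : List (List (String × String))) (met : Bool) :
    matchC2Loop l met =
      if l.any csHit then some "Cobalt Strike (default profile)"
      else if met || l.any metHit then some "Possible Metasploit"
      else none := by
  induction l generalizing met with
  | nil => simp [matchC2Loop]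
  | cons f rest ih =>
    rw [List.any_cons, List.any_cons]
    show (if csHit f then some "Cobalt Strike (default profile)"
          else matchC2Loop rest (met || metHit f)) = _
    cases hc : csHit f with
    | true => simp
    | false =>
      rw [ih]
      simp [Bool.or_assoc]

-- ===== VERDICT (by name: the statement is the Claim_ definition above) =====
theorem match_c2_profile_py_spec : Claim_equal_match_c2_profile_py := by
  intro flows _
  unfold Spec_match_c2_profile_py match_c2_profile_py match_c2_profile_py_alt
  rw [matchC2Loop_eq]
  simp only [List.any_map]
  rfl
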